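-- pv_equiv track=rewrite | github.com/SirNaCl/AdventOfCode | 2023/14/solution.py | calc_load_n
-- ===== SOURCE A (Python) =====
-- def calc_load_n(d):
--     tot = 0
--     for row in d:
--         rocks = []
--         stop = 0
--         for i, c in enumerate(row):
--             if c == 'O':
--                 rocks.append(stop)
--                 stop += 1
--             elif c == '#':
--                 stop = i+1
--         for r in rocks:
--             tot += len(row)-r
--     return tot
-- ===== SOURCE B (Python) =====
-- def calc_load_n(d):
--     tot = 0
--     for row in d:
--         n = len(row)
--         offset = 0
--         for seg in row.split('#'):
--             k = seg.count('O')
--             tot += k * (n - offset) - k * (k - 1) // 2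
--             offset += len(seg) + 1
--     return tot
-- ===== Notes on version B (the rewrite author's own statement) =====
-- stated objective: alternative
-- what changed: B replaces A's per-rock simulation (building a rocks list of resting positions and a second loop summing loads) by splitting each row at '#' walls and adding a closed-form arithmetic-series load k*(n-start) - k*(k-1)//2 per segment, with the segment start tracked by a running offset.
import Mathlib
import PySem

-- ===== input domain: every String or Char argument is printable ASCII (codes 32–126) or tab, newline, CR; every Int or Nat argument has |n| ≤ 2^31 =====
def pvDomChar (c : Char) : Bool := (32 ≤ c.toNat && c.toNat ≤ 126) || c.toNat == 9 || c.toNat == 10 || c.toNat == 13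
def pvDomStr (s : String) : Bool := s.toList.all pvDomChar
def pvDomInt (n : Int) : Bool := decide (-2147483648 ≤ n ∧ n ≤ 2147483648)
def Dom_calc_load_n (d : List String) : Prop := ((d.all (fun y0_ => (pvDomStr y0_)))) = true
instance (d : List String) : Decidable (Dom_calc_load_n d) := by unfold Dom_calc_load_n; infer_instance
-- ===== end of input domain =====

-- B replaces A's per-rock simulation by a '#'-segment split with a closed-form
-- arithmetic-series load per segment (objective: alternative — no rocks list, no per-rock loop).

-- ===== PORT A =====
-- literal transliteration of A: per row, simulate rolling left, collecting resting
-- positions in `rocks`, then a second loop adds len(row) - r for each rock.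
def calc_load_n (d : List String) : Int :=
  d.foldl (fun tot row =>
    let st := (PySem.List.enumerate row.toList).foldl
      (fun (st : List Int × Int) ic =>
        if ic.2 = 'O' then (st.1 ++ [st.2], st.2 + 1)
        else if ic.2 = '#' then (st.1, ic.1 + 1)
        else st) ([], 0)
    st.1.foldl (fun t r => t + (PySem.Str.len row - r)) tot) 0

-- ===== PORT B =====
-- literal transliteration of B (Source B): split the row at '#', per segment add
-- k*(n-offset) - k*(k-1)//2 where k = seg.count('O'); offset += len(seg)+1.
def calc_load_n_alt (d : List String) : Int :=
  d.foldl (fun tot row =>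
    let n := PySem.Str.len row
    ((PySem.Chars.splitOn row.toList ['#']).foldl
      (fun (st : Int × Int) seg =>
        let k : Int := (PySem.Chars.count seg ['O'] : Int)
        (st.1 + (k * (n - st.2) - PySem.Int.floordiv (k * (k - 1)) 2),
         st.2 + (seg.length : Int) + 1))
      (tot, 0)).1) 0

-- ===== PRECONDITION & SPEC =====
def Spec_calc_load_n (d : List String) (out : Int) : Prop := out = calc_load_n_alt d
instance (d : List String) (out : Int) : Decidable (Spec_calc_load_n d out) := by unfold Spec_calc_load_n; infer_instance

-- ===== CLAIM (what is proved, stated in full; the proofs are below) =====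
def Claim_equal_calc_load_n : Prop := ∀ (d : List String), Dom_calc_load_n d → Spec_calc_load_n d (calc_load_n d)

-- ===== LEMMAS AND PROOFS =====

-- structural single-char split (proof-side characterisation of PySem.Chars.splitOn cs ['#'])
def mySplit (sep : Char) : List Char → List (List Char)
  | [] => [[]]
  | c :: rest =>
    if c = sep then [] :: mySplit sep rest
    else match mySplit sep rest with
      | [] => [[c]]
      | s :: ss => (c :: s) :: ss

lemma mySplit_ne_nil (sep : Char) (cs : List Char) : mySplit sep cs ≠ [] := by
  cases cs with
  | nil => simp [mySplit]
  | cons c rest =>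
    simp only [mySplit]
    split_ifs
    · simp
    · cases h : mySplit sep rest <;> simp

-- loads of the rocks A collects, directly as a recursion on the row
def loadA (n : Int) : List Char → Int → Int → Int
  | [], _, _ => 0
  | c :: cs, i, s =>
    if c = 'O' then (n - s) + loadA n cs (i + 1) (s + 1)
    else if c = '#' then loadA n cs (i + 1) (i + 1)
    else loadA n cs (i + 1) s

-- load of k rocks resting at s, s+1, …, s+k-1
def contrib (n : Int) : Nat → Int → Int
  | 0, _ => 0
  | k + 1, s => (n - s) + contrib n k (s + 1)

-- B's per-segment sum, as a recursion on the segment list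
def loadB (n : Int) : List (List Char) → Int → Int
  | [], _ => 0
  | seg :: ss, off => contrib n (seg.count 'O') off + loadB n ss (off + (seg.length : Int) + 1)

-- PySem.Chars.count with a one-char needle is List.count
lemma count_go_single (v : Char) : ∀ (l : List Char) (fuel acc : Nat), l.length ≤ fuel →
    PySem.Chars.count.go [v] fuel l acc = acc + l.count v := by
  intro l
  induction l with
  | nil => intro fuel acc _; cases fuel <;> simp [PySem.Chars.count.go]
  | cons c t ih =>
    intro fuel acc h
    cases fuel with
    | zero => simp at h
    | succ f =>
      have hstep : PySem.Chars.count.go [v] (f + 1) (c :: t) acc =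
          if (v == c) then PySem.Chars.count.go [v] f t (acc + 1)
          else PySem.Chars.count.go [v] f t acc := by
        simp [PySem.Chars.count.go, List.isPrefixOf]
      rw [hstep]
      have ht : t.length ≤ f := by simpa using h
      by_cases hv : v = c
      · rw [if_pos (by simp [hv]), ih f (acc + 1) ht, List.count_cons]
        simp [hv]; omega
      · rw [if_neg (by simp only [beq_iff_eq]; exact hv), ih f acc ht, List.count_cons]
        have : (c == v) = false := beq_eq_false_iff_ne.mpr (Ne.symm hv)
        simp [this]

lemma count_single (v : Char) (l : List Char) : PySem.Chars.count l [v] = l.count v := by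
  rw [PySem.Chars.count]
  simp [count_go_single v l l.length 0 le_rfl]

-- PySem.Chars.splitOn with a one-char separator is mySplit
lemma splitOn_go_single (sep : Char) : ∀ (l : List Char) (fuel : Nat) (cur : List Char)
    (acc : List (List Char)), l.length ≤ fuel →
    PySem.Chars.splitOn.go [sep] fuel l cur acc =
      acc.reverse ++ (match mySplit sep l with
        | [] => []
        | s :: ss => (cur.reverse ++ s) :: ss) := by
  intro l
  induction l with
  | nil =>
    intro fuel cur acc _
    cases fuel <;> simp [PySem.Chars.splitOn.go, mySplit]
  | cons c t ih =>
    intro fuel cur acc h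
    cases fuel with
    | zero => simp at h
    | succ f =>
      have hstep : PySem.Chars.splitOn.go [sep] (f + 1) (c :: t) cur acc =
          if sep == c then PySem.Chars.splitOn.go [sep] f t [] (cur.reverse :: acc)
          else PySem.Chars.splitOn.go [sep] f t (c :: cur) acc := by
        simp [PySem.Chars.splitOn.go, List.isPrefixOf]
      rw [hstep]
      have ht : t.length ≤ f := by simpa using h
      by_cases hv : c = sep
      · rw [if_pos (by simp [hv]), ih f [] (cur.reverse :: acc) ht]
        subst hv
        cases hms : mySplit c t with
        | nil => exact absurd hms (mySplit_ne_nil c t)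
        | cons s ss => simp [mySplit, hms]
      · rw [if_neg (by simp only [beq_iff_eq]; exact Ne.symm hv), ih f (c :: cur) acc ht]
        cases hms : mySplit sep t with
        | nil => exact absurd hms (mySplit_ne_nil sep t)
        | cons s ss => simp [mySplit, hms, hv]

lemma splitOn_single (sep : Char) (cs : List Char) :
    PySem.Chars.splitOn cs [sep] = mySplit sep cs := by
  rw [PySem.Chars.splitOn, splitOn_go_single sep cs (cs.length + 1) [] [] (by omega)]
  cases hms : mySplit sep cs with
  | nil => exact absurd hms (mySplit_ne_nil sep cs)
  | cons s ss => simp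

-- A's simulation + summation loop computes loadA
lemma sumFoldA (n : Int) : ∀ (cs : List Char) (i s : Int) (rocks : List Int) (tot : Int),
    (((PySem.List.enumerate cs i).foldl
      (fun (st : List Int × Int) ic =>
        if ic.2 = 'O' then (st.1 ++ [st.2], st.2 + 1)
        else if ic.2 = '#' then (st.1, ic.1 + 1)
        else st) (rocks, s)).1).foldl (fun t r => t + (n - r)) tot
    = rocks.foldl (fun t r => t + (n - r)) tot + loadA n cs i s := by
  intro cs
  induction cs with
  | nil => intro i s rocks tot; simp [PySem.List.enumerate_nil, loadA]
  | cons c cs ih =>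
    intro i s rocks tot
    rw [PySem.List.enumerate_cons]
    simp only [List.foldl_cons, loadA]
    by_cases hO : c = 'O'
    · rw [if_pos hO, if_pos hO, ih (i + 1) (s + 1) (rocks ++ [s]) tot, List.foldl_append]
      simp only [List.foldl_cons, List.foldl_nil]
      omega
    · by_cases hH : c = '#'
      · rw [if_neg hO, if_neg hO, if_pos hH, if_pos hH, ih (i + 1) (i + 1) rocks tot]
      · rw [if_neg hO, if_neg hO, if_neg hH, if_neg hH, ih (i + 1) s rocks tot]

-- floor division by 2 of k*(k-1) for a Nat k is the Nat division
lemma floordiv_tri (k : Nat) :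
    PySem.Int.floordiv ((k : Int) * ((k : Int) - 1)) 2 = ((k * (k - 1) / 2 : Nat) : Int) := by
  cases k with
  | zero => decide
  | succ j =>
    have h : ((j + 1 : Nat) : Int) * (((j + 1 : Nat) : Int) - 1) = (((j + 1) * j : Nat) : Int) := by
      push_cast; ring
    rw [h]
    have := PySem.Int.floordiv_natCast ((j + 1) * j) 2
    simpa using this

lemma contrib_closed (n : Int) (k : Nat) : ∀ s : Int,
    contrib n k s = (k : Int) * (n - s) - PySem.Int.floordiv ((k : Int) * ((k : Int) - 1)) 2 := by
  induction k with
  | zero => intro s; simp [contrib]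
  | succ k ih =>
    intro s
    rw [contrib, ih (s + 1), floordiv_tri, floordiv_tri]
    have h2 : (k + 1) * ((k + 1) - 1) / 2 = k * (k - 1) / 2 + k := by
      have hk : (k + 1) * k = k * (k - 1) + k * 2 := by
        cases k with
        | zero => rfl
        | succ j =>
          simp only [Nat.add_sub_cancel]
          ring
      simp only [Nat.add_sub_cancel, hk]
      rw [Nat.add_mul_div_right _ _ (by norm_num : (0:Nat) < 2)]
    rw [h2]
    push_cast
    ring

-- B's fold over the segments computes loadB
lemma foldB (n : Int) : ∀ (segs : List (List Char)) (tot off : Int),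
    ((segs.foldl
      (fun (st : Int × Int) seg =>
        ((st.1 + ((PySem.Chars.count seg ['O'] : Int) * (n - st.2)
            - PySem.Int.floordiv ((PySem.Chars.count seg ['O'] : Int)
                * ((PySem.Chars.count seg ['O'] : Int) - 1)) 2)),
         st.2 + (seg.length : Int) + 1))
      (tot, off)).1) = tot + loadB n segs off := by
  intro segs
  induction segs with
  | nil => intro tot off; simp [loadB]
  | cons seg ss ih =>
    intro tot off
    simp only [List.foldl_cons, loadB]
    rw [ih]
    rw [count_single, contrib_closed n (seg.count 'O') off]
    ring

-- the main correspondence: A's simulated load equals B's per-segment load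
lemma loadA_eq (n : Int) : ∀ (cs : List Char) (i s : Int),
    loadA n cs i s = (match mySplit '#' cs with
      | [] => 0
      | seg :: ss => contrib n (seg.count 'O') s + loadB n ss (i + (seg.length : Int) + 1)) := by
  intro cs
  induction cs with
  | nil => intro i s; simp [loadA, mySplit, contrib, loadB]
  | cons c cs ih =>
    intro i s
    simp only [loadA]
    by_cases hO : c = 'O'
    · subst hO
      rw [if_pos rfl, ih (i + 1) (s + 1)]
      cases hms : mySplit '#' cs with
      | nil => exact absurd hms (mySplit_ne_nil '#' cs)
      | cons seg ss =>
        simp only [mySplit, hms, if_neg (show ¬ ('O' : Char) = '#' by decide),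
          List.length_cons, List.count_cons_self, contrib]
        push_cast
        ring
    · by_cases hH : c = '#'
      · rw [if_neg hO, if_pos hH, ih (i + 1) (i + 1)]
        cases hms : mySplit '#' cs with
        | nil => exact absurd hms (mySplit_ne_nil '#' cs)
        | cons seg ss =>
          simp [mySplit, if_pos hH, hms, contrib, loadB]
      · rw [if_neg hO, if_neg hH, ih (i + 1) s]
        cases hms : mySplit '#' cs with
        | nil => exact absurd hms (mySplit_ne_nil '#' cs)
        | cons seg ss =>
          simp only [mySplit, if_neg hH, hms, List.length_cons]
          rw [List.count_cons_of_ne (by simpa using hO)]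
          have hlen : ((seg.length + 1 : Nat) : Int) = (seg.length : Int) + 1 := by push_cast; ring
          rw [hlen]
          ring_nf

-- per-row equality of the two loop bodies
lemma row_eq (row : String) (tot : Int) :
    (((PySem.List.enumerate row.toList).foldl
      (fun (st : List Int × Int) ic =>
        if ic.2 = 'O' then (st.1 ++ [st.2], st.2 + 1)
        else if ic.2 = '#' then (st.1, ic.1 + 1)
        else st) ([], 0)).1).foldl (fun t r => t + (PySem.Str.len row - r)) tot
    = ((PySem.Chars.splitOn row.toList ['#']).foldl
      (fun (st : Int × Int) seg =>
        ((st.1 + ((PySem.Chars.count seg ['O'] : Int) * (PySem.Str.len row - st.2)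
            - PySem.Int.floordiv ((PySem.Chars.count seg ['O'] : Int)
                * ((PySem.Chars.count seg ['O'] : Int) - 1)) 2)),
         st.2 + (seg.length : Int) + 1))
      (tot, 0)).1 := by
  set n := PySem.Str.len row with hn
  rw [sumFoldA n row.toList 0 0 [] tot, foldB n, splitOn_single]
  simp only [List.foldl_nil]
  rw [loadA_eq n row.toList 0 0]
  cases hms : mySplit '#' row.toList with
  | nil => exact absurd hms (mySplit_ne_nil '#' row.toList)
  | cons seg ss => simp [loadB]

lemma fold_eq : ∀ (d : List String) (tot : Int),
    d.foldl (fun tot row =>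
      let st := (PySem.List.enumerate row.toList).foldl
        (fun (st : List Int × Int) ic =>
          if ic.2 = 'O' then (st.1 ++ [st.2], st.2 + 1)
          else if ic.2 = '#' then (st.1, ic.1 + 1)
          else st) ([], 0)
      st.1.foldl (fun t r => t + (PySem.Str.len row - r)) tot) tot
    = d.foldl (fun tot row =>
      let n := PySem.Str.len row
      ((PySem.Chars.splitOn row.toList ['#']).foldl
        (fun (st : Int × Int) seg =>
          let k : Int := (PySem.Chars.count seg ['O'] : Int)
          (st.1 + (k * (n - st.2) - PySem.Int.floordiv (k * (k - 1)) 2),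
           st.2 + (seg.length : Int) + 1))
        (tot, 0)).1) tot := by
  intro d
  induction d with
  | nil => intro tot; rfl
  | cons row d ih =>
    intro tot
    simp only [List.foldl_cons]
    rw [← ih]
    congr 1
    exact row_eq row tot

-- ===== VERDICT (by name: the statement is the Claim_ definition above) =====
theorem calc_load_n_spec : Claim_equal_calc_load_n := by
  intro d _
  unfold Spec_calc_load_n calc_load_n calc_load_n_alt
  exact fold_eq d 0
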